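-- pv_equiv track=rewrite | github.com/OnyxALeroy/FromExcelToNDS | src/string_transform.py | formalize
-- ===== SOURCE A (Python) =====
-- def formalize(item_name:str)->str:
--     res = ""
--     for char in item_name:
--         if char == "(":
--             break
--         elif char != " " and char != "-":
--             res += char.upper()
--     return res
-- ===== SOURCE B (Python) =====
-- def formalize(item_name: str) -> str:
--     i = item_name.find('(')
--     prefix = item_name if i < 0 else item_name[:i]
--     return prefix.replace(' ', '').replace('-', '').upper()
-- ===== Notes on version B (the rewrite author's own statement) =====
-- stated objective: simpler
-- what changed: Replaces the early-breaking char-by-char accumulation loop with a slice-then-transform pipeline: find the cut point of the open parenthesis, slice the prefix, then remove spaces/dashes with replace and uppercase the whole prefix at once.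
import Mathlib
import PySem

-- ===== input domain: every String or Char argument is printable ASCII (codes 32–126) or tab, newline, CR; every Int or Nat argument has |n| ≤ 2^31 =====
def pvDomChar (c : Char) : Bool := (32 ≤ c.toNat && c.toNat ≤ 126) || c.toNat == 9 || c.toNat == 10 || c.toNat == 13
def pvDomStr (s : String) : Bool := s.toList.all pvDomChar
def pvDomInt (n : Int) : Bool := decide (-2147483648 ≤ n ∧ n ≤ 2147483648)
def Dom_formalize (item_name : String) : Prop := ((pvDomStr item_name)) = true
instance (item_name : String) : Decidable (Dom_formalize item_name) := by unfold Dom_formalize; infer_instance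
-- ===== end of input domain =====

-- B replaces A's early-breaking per-character accumulation loop by a pipeline:
-- find the '(' cut point, slice the prefix, strip spaces/dashes with replace, uppercase once.

-- ===== PORT A =====
-- the 'for char in item_name' loop with break and 'res += char.upper()'
def formalizeLoop (acc : List Char) : List Char → List Char
  | [] => acc
  | c :: rest =>
    if c = '(' then acc
    else if c ≠ ' ' ∧ c ≠ '-' then formalizeLoop (acc ++ PySem.Chars.upper [c]) rest
    else formalizeLoop acc rest

def formalize (item_name : String) : String :=
  String.ofList (formalizeLoop [] item_name.toList)

-- ===== PORT B =====
def formalize_alt (item_name : String) : String :=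
  let i := PySem.Str.find item_name "("
  let pre := if i < 0 then item_name else PySem.Str.slice item_name none (some i)
  PySem.Str.upper (PySem.Str.replace (PySem.Str.replace pre " " "") "-" "")

-- ===== PRECONDITION & SPEC =====
def Spec_formalize (item_name : String) (out : String) : Prop := out = formalize_alt item_name
instance (item_name : String) (out : String) : Decidable (Spec_formalize item_name out) := by unfold Spec_formalize; infer_instance

-- ===== CLAIM (what is proved, stated in full; the proofs are below) =====
def Claim_equal_formalize : Prop := ∀ (item_name : String), Dom_formalize item_name → Spec_formalize item_name (formalize item_name)

-- ===== LEMMAS AND PROOFS =====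

-- A's loop is: uppercase the space/dash-free part of the prefix before the first '('
theorem formalizeLoop_eq (acc : List Char) (cs : List Char) :
    formalizeLoop acc cs =
      acc ++ ((cs.takeWhile (· ≠ '(')).filter (fun c => decide (c ≠ ' ' ∧ c ≠ '-'))).map PySem.Chars.upperChar := by
  induction cs generalizing acc with
  | nil => simp [formalizeLoop]
  | cons c rest ih =>
    by_cases h : c = '('
    · simp [formalizeLoop, h]
    · by_cases h2 : c ≠ ' ' ∧ c ≠ '-'
      · simp [formalizeLoop, h, h2, ih, PySem.Chars.upper]
      · simp [formalizeLoop, h, h2, ih]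

-- replace(old=[c], new=[]) is filtering c out
theorem replace_go_single_nil (c : Char) (l acc : List Char) (fuel : Nat) (h : l.length ≤ fuel) :
    PySem.Chars.replace.go [c] [] fuel l acc = acc.reverse ++ l.filter (· ≠ c) := by
  induction l generalizing fuel acc with
  | nil => cases fuel <;> simp [PySem.Chars.replace.go]
  | cons x t ih =>
    cases fuel with
    | zero => simp at h
    | succ n =>
      simp only [PySem.Chars.replace.go]
      by_cases hx : x = c
      · simp [List.isPrefixOf, hx, ih (fuel := n) (acc := acc) (by simpa using h)]
      · simp [List.isPrefixOf, hx, Ne.symm hx, ih (fuel := n) (acc := x :: acc) (by simpa using h)]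

theorem replace_single_nil (c : Char) (l : List Char) :
    PySem.Chars.replace l [c] [] = l.filter (· ≠ c) := by
  simp [PySem.Chars.replace, replace_go_single_nil c l [] l.length le_rfl]

-- find of a single char locates the takeWhile boundary
theorem find_go_single (c : Char) (l : List Char) (k : Nat) :
    PySem.Chars.find.go [c] l k =
      if c ∈ l then (k : Int) + (l.takeWhile (· ≠ c)).length else -1 := by
  induction l generalizing k with
  | nil => simp [PySem.Chars.find.go]
  | cons x t ih =>
    by_cases hx : x = c
    · simp [PySem.Chars.find.go, List.isPrefixOf, hx]
    · simp [PySem.Chars.find.go, List.isPrefixOf, hx, Ne.symm hx, ih (k + 1)]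
      by_cases hm : c ∈ t <;> simp [hm]
      ring

theorem find_single (c : Char) (l : List Char) :
    PySem.Chars.find l [c] =
      if c ∈ l then ((l.takeWhile (· ≠ c)).length : Int) else -1 := by
  simp [PySem.Chars.find, find_go_single c l 0]

-- ===== VERDICT (by name: the statement is the Claim_ definition above) =====
theorem formalize_spec : Claim_equal_formalize := by
  intro s _
  unfold Spec_formalize formalize formalize_alt
  rw [formalizeLoop_eq]
  dsimp only
  by_cases hm : '(' ∈ s.toList
  · have hfind : PySem.Str.find s "(" = ((s.toList.takeWhile (· ≠ '(')).length : Int) := by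
      simp [PySem.Str.find, find_single, hm]
    rw [hfind, if_neg (not_lt.mpr (Int.natCast_nonneg _))]
    simp only [PySem.Str.upper]
    apply congrArg String.ofList
    simp [PySem.Str.replace, replace_single_nil, List.filter_filter, PySem.Chars.upper]
    rw [show List.take (List.takeWhile (fun x => !decide (x = '(')) s.toList).length s.toList
          = List.takeWhile (fun x => !decide (x = '(')) s.toList from
        (List.prefix_iff_eq_take.mp (List.takeWhile_prefix _)).symm]
    refine congrArg _ (List.filter_congr fun c _ => ?_)
    simp [Bool.and_comm]
  · have hfind : PySem.Str.find s "(" = -1 := by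
      simp [PySem.Str.find, find_single, hm]
    rw [hfind, if_pos (by norm_num)]
    simp only [PySem.Str.upper]
    apply congrArg String.ofList
    simp [PySem.Str.replace, replace_single_nil, List.filter_filter, PySem.Chars.upper]
    rw [show List.takeWhile (fun x => !decide (x = '(')) s.toList = s.toList from
        List.takeWhile_eq_self_iff.mpr fun c hc => by
          simp only [Bool.not_eq_true', decide_eq_false_iff_not]
          rintro rfl; exact hm hc]
    refine congrArg _ (List.filter_congr fun c _ => ?_)
    simp [Bool.and_comm]
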